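-- pv_equiv track=rewrite | github.com/airellzulkarnain/program_desktop_koperasi | app/crud.py | bagi_pembayaran
-- ===== SOURCE A (Python) =====
-- def bagi_pembayaran(nominal: int, dibagi: int)-> list:
--     rupiah: int = [100_000, 50_000, 20_000, 10_000, 5_000, 2_000, 1_000, 500]
--     result: int = 0
--
--     while nominal:
--         x = nominal//dibagi
--         for uang in rupiah:
--             if uang <= x:
--                 x = uang
--                 break
--             elif uang == 500:
--                 return [result+nominal]+[result for i in range(dibagi-1)]
--
--         result += (nominal//(x*dibagi))*x
--         nominal = (nominal%(x*dibagi))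
--     return [result for i in range(dibagi)]
-- ===== SOURCE B (Python) =====
-- def bagi_pembayaran(nominal: int, dibagi: int) -> list:
--     if nominal == 0:
--         return [0] * dibagi
--     if nominal // dibagi < 500:
--         return [nominal] + [0] * (dibagi - 1)
--     per = 500 * (nominal // (500 * dibagi))
--     rem = nominal - per * dibagi
--     if rem == 0:
--         return [per] * dibagi
--     return [per + rem] + [per] * (dibagi - 1)
-- ===== Notes on version B (the rewrite author's own statement) =====
-- stated objective: simpler
-- what changed: The while-greedy loop over cash denominations is replaced by direct arithmetic: since every denomination is a multiple of 500, the accumulated per-person amount is just 500*(nominal//(500*dibagi)), so B computes the split in O(1) integer operations plus building the output list.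
import Mathlib
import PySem

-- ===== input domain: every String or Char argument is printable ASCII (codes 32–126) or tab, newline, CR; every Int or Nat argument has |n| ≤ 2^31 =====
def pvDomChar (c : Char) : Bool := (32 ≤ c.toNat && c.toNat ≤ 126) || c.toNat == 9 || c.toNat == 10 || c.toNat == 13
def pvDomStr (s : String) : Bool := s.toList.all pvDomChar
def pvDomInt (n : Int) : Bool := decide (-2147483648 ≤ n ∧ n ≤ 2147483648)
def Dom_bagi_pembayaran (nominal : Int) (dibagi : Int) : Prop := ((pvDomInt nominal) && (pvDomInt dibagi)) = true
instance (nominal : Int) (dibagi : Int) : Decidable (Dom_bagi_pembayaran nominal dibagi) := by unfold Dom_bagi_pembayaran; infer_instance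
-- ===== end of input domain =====

-- B replaces A's while-greedy loop over the denominations by direct arithmetic
-- (every denomination is a multiple of 500), objective: simpler.

-- ===== PORT A =====
def pvRupiah : List Int := [100000, 50000, 20000, 10000, 5000, 2000, 1000, 500]

-- the inner `for uang in rupiah` loop: `some u` = break with x set to u,
-- `none` = the `elif uang == 500: return …` fires; `some x` on fall-through (unreachable for pvRupiah)
def pvPick (x : Int) : List Int → Option Int
  | [] => some x
  | u :: rest => if u ≤ x then some u else if u = 500 then none else pvPick x rest

-- facts the port's own termination proof needs (cited in decreasing_by), hence above the port
theorem pvPick_some_gen (l : List Int) (x u : Int) (h500 : (500:Int) ∈ l)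
    (h : pvPick x l = some u) : u ∈ l ∧ u ≤ x := by
  induction l with
  | nil => cases h500
  | cons v rest ih =>
    rw [pvPick] at h
    split_ifs at h with h1 h2
    · obtain rfl : v = u := by injection h
      exact ⟨List.mem_cons_self, h1⟩
    · have h500' : (500:Int) ∈ rest := by
        rcases List.mem_cons.mp h500 with he | he
        · exact absurd he.symm h2
        · exact he
      obtain ⟨hm, hle⟩ := ih h500' h
      exact ⟨List.mem_cons_of_mem _ hm, hle⟩


theorem pvPick_some (x u : Int) (h : pvPick x pvRupiah = some u) :
    500 ≤ u ∧ u ≤ x ∧ 500 ∣ u := by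
  obtain ⟨hm, hle⟩ := pvPick_some_gen pvRupiah x u (by rw [pvRupiah]; simp) h
  rw [pvRupiah] at hm
  simp only [List.mem_cons, List.not_mem_nil, or_false] at hm
  rcases hm with rfl | rfl | rfl | rfl | rfl | rfl | rfl | rfl
  all_goals exact ⟨by norm_num, hle, by decide⟩

-- sign analysis of one greedy step
theorem pvStep_signs (n d x : Int) (hx5 : 500 ≤ x)
    (hxle : x ≤ PySem.Int.floordiv n d) :
    (0 < d ∧ 0 < n ∧ 0 < x * d ∧ x * d ≤ n) ∨
    (d < 0 ∧ n < 0 ∧ x * d < 0 ∧ n ≤ x * d) := by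
  rcases lt_trichotomy d 0 with hd | hd | hd
  · right
    have h1 : PySem.Int.floordiv n d = PySem.Int.floordiv (-n) (-d) := by
      rw [PySem.Int.floordiv_neg_neg]
    have hdp : (0:Int) < -d := by omega
    have h2 : x * (-d) ≤ -n := by
      rw [← PySem.Int.le_floordiv_iff_mul_le hdp, ← h1]; exact hxle
    have hn : n < 0 := by
      by_contra hn
      have : PySem.Int.floordiv (-n) (-d) < 1 := by
        rw [PySem.Int.floordiv_lt_iff_lt_mul hdp]; nlinarith
      omega
    refine ⟨hd, hn, by nlinarith, by nlinarith⟩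
  · exfalso
    subst hd
    have : PySem.Int.floordiv n 0 = 0 := by simp [PySem.Int.floordiv]
    omega
  · left
    have h2 : x * d ≤ n := by
      rw [← PySem.Int.le_floordiv_iff_mul_le hd]; exact hxle
    exact ⟨hd, by nlinarith, by nlinarith, h2⟩

-- the measure of A's while loop decreases (cited in decreasing_by)
theorem pvStep_dec (n d x : Int) (hx5 : 500 ≤ x)
    (hxle : x ≤ PySem.Int.floordiv n d) (hn : n ≠ 0) :
    (PySem.Int.mod n (x * d)).natAbs < n.natAbs := by
  rcases pvStep_signs n d x hx5 hxle with ⟨_, hn', hm, hle⟩ | ⟨_, hn', hm, hle⟩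
  · have h1 := PySem.Int.mod_nonneg n hm
    have h2 := PySem.Int.mod_lt n hm
    omega
  · have h1 := PySem.Int.mod_neg_bounds n hm
    omega

-- the `while nominal:` loop of A, with `result` as accumulator
def pvLoopA (nominal dibagi result : Int) : List Int :=
  if h : nominal = 0 then List.replicate dibagi.toNat result
  else
    match hp : pvPick (PySem.Int.floordiv nominal dibagi) pvRupiah with
    | none => (result + nominal) :: List.replicate (dibagi - 1).toNat result
    | some x =>
        pvLoopA (PySem.Int.mod nominal (x * dibagi)) dibagi
          (result + PySem.Int.floordiv nominal (x * dibagi) * x)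
  termination_by nominal.natAbs
  decreasing_by
    exact pvStep_dec nominal dibagi x (pvPick_some _ x hp).1 (pvPick_some _ x hp).2.1 h

def bagi_pembayaran (nominal : Int) (dibagi : Int) : List Int :=
  pvLoopA nominal dibagi 0

-- ===== PORT B =====
def bagi_pembayaran_alt (nominal : Int) (dibagi : Int) : List Int :=
  if nominal = 0 then List.replicate dibagi.toNat 0
  else if PySem.Int.floordiv nominal dibagi < 500 then
    nominal :: List.replicate (dibagi - 1).toNat 0
  else
    let per := 500 * PySem.Int.floordiv nominal (500 * dibagi)
    let rem := nominal - per * dibagi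
    if rem = 0 then List.replicate dibagi.toNat per
    else (per + rem) :: List.replicate (dibagi - 1).toNat per

-- ===== PRECONDITION & SPEC =====
-- Pre_ excludes only dibagi = 0 with nominal ≠ 0, where Python A (and B) raise ZeroDivisionError.
def Pre_bagi_pembayaran (nominal : Int) (dibagi : Int) : Prop := nominal = 0 ∨ dibagi ≠ 0
instance (nominal : Int) (dibagi : Int) : Decidable (Pre_bagi_pembayaran nominal dibagi) := by unfold Pre_bagi_pembayaran; infer_instance

def pvWitness_bagi_pembayaran : Int × Int := (123456, 3)

def Spec_bagi_pembayaran (nominal : Int) (dibagi : Int) (out : List Int) : Prop := out = bagi_pembayaran_alt nominal dibagi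
instance (nominal : Int) (dibagi : Int) (out : List Int) : Decidable (Spec_bagi_pembayaran nominal dibagi out) := by unfold Spec_bagi_pembayaran; infer_instance

-- ===== CLAIM =====
def Claim_equal_bagi_pembayaran : Prop := ∀ (nominal : Int) (dibagi : Int), Dom_bagi_pembayaran nominal dibagi → Pre_bagi_pembayaran nominal dibagi → Spec_bagi_pembayaran nominal dibagi (bagi_pembayaran nominal dibagi)

-- ===== LEMMAS AND PROOFS =====

theorem pvPick_none_gen (l : List Int) (x : Int) (h : pvPick x l = none) : x < 500 := by
  induction l with
  | nil => cases h
  | cons v rest ih =>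
    rw [pvPick] at h
    split_ifs at h with h1 h2
    · omega
    · exact ih h

theorem pvPick_none (x : Int) (h : pvPick x pvRupiah = none) : x < 500 := pvPick_none_gen _ _ h


-- closed form of the loop with accumulator r (B's formula shifted by r)
def pvG (n d r : Int) : List Int :=
  if n = 0 then List.replicate d.toNat r
  else if PySem.Int.floordiv n d < 500 then (r + n) :: List.replicate (d - 1).toNat r
  else
    let per := 500 * PySem.Int.floordiv n (500 * d)
    if n - per * d = 0 then List.replicate d.toNat (r + per)
    else (r + per + (n - per * d)) :: List.replicate (d - 1).toNat (r + per)

theorem pv_floordiv_zero_left (b : Int) : PySem.Int.floordiv 0 b = 0 := by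
  simp [PySem.Int.floordiv]

theorem pv_floordiv_add_mul (b m c : Int) (hb : b ≠ 0) :
    PySem.Int.floordiv (m * b + c) b = m + PySem.Int.floordiv c b := by
  rcases lt_trichotomy b 0 with h | h | h
  · have hb' : (0:Int) < -b := by omega
    have e1 : m * b + c = -(m * (-b) + (-c)) := by ring
    have e2 : PySem.Int.floordiv (-(m * (-b) + (-c))) b
        = PySem.Int.floordiv (m * (-b) + (-c)) (-b) := by
      rw [← PySem.Int.floordiv_neg_neg (m * (-b) + (-c)) (-b)]; ring_nf
    have e3 : PySem.Int.floordiv c b = PySem.Int.floordiv (-c) (-b) := by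
      rw [PySem.Int.floordiv_neg_neg]
    rw [e1, e2, e3]
    have h1 := PySem.Int.floordiv_mul_add_mod (-c) (-b)
    have h2 := PySem.Int.mod_nonneg (-c) hb'
    have h3 := PySem.Int.mod_lt (-c) hb'
    rw [PySem.Int.floordiv_eq_iff_of_pos hb']
    constructor <;> nlinarith
  · omega
  · have h1 := PySem.Int.floordiv_mul_add_mod c b
    have h2 := PySem.Int.mod_nonneg c h
    have h3 := PySem.Int.mod_lt c h
    rw [PySem.Int.floordiv_eq_iff_of_pos h]
    constructor <;> nlinarith

theorem pv_floordiv_eq_zero (c b : Int) (hb : b ≠ 0)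
    (hpos : 0 < b → 0 ≤ c ∧ c < b) (hneg : b < 0 → b < c ∧ c ≤ 0) :
    PySem.Int.floordiv c b = 0 := by
  rcases lt_trichotomy b 0 with h | h | h
  · have hb' : (0:Int) < -b := by omega
    rw [← PySem.Int.floordiv_neg_neg c b, PySem.Int.floordiv_eq_iff_of_pos hb']
    have := hneg h
    constructor <;> nlinarith
  · omega
  · rw [PySem.Int.floordiv_eq_iff_of_pos h]
    have := hpos h
    constructor <;> nlinarith

-- one greedy step preserves the closed form: core with opaque quotient q and remainder n'
theorem pvG_step_core (n d r x k q n' : Int) (hd : d ≠ 0) (hn : n ≠ 0)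
    (hk : x = 500 * k) (hk1 : 1 ≤ k)
    (hdecomp : q * (x * d) + n' = n)
    (hnbig : ¬ PySem.Int.floordiv n d < 500)
    (hb : (0 < d → 0 ≤ n' ∧ n' < x * d) ∧ (d < 0 → x * d < n' ∧ n' ≤ 0)) :
    pvG n' d (r + q * x) = pvG n d r := by
  have h500d : (500 : Int) * d ≠ 0 := mul_ne_zero (by norm_num) hd
  have hI1 : PySem.Int.floordiv n (500 * d) = q * k + PySem.Int.floordiv n' (500 * d) := by
    have e : n = (q * k) * (500 * d) + n' := by rw [← hdecomp, hk]; ring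
    rw [e, pv_floordiv_add_mul _ _ _ h500d]
  by_cases hz : n' = 0
  · -- exact division: A's loop ends with nominal = 0
    have hI0 : PySem.Int.floordiv n' (500 * d) = 0 := by rw [hz]; exact pv_floordiv_zero_left _
    have hper : 500 * PySem.Int.floordiv n (500 * d) = q * x := by rw [hI1, hI0, hk]; ring
    have hrem : n - q * x * d = 0 := by rw [← hdecomp, hz]; ring
    rw [pvG, if_pos hz, pvG, if_neg hn, if_neg hnbig]
    simp only [hper, if_pos hrem]
  · by_cases hs : PySem.Int.floordiv n' d < 500
    · -- remainder too small to split further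
      have hI0 : PySem.Int.floordiv n' (500 * d) = 0 := by
        apply pv_floordiv_eq_zero _ _ h500d
        · intro h5
          have hdp : (0:Int) < d := by nlinarith
          have hbp := hb.1 hdp
          refine ⟨hbp.1, ?_⟩
          have := (PySem.Int.floordiv_lt_iff_lt_mul hdp).mp hs
          nlinarith
        · intro h5
          have hdn : d < 0 := by nlinarith
          have hbn := hb.2 hdn
          refine ⟨?_, hbn.2⟩
          have e : PySem.Int.floordiv n' d = PySem.Int.floordiv (-n') (-d) := by
            rw [PySem.Int.floordiv_neg_neg]
          have := (PySem.Int.floordiv_lt_iff_lt_mul (b := -d) (by omega)).mp (by rw [← e]; exact hs)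
          nlinarith
      have hper : 500 * PySem.Int.floordiv n (500 * d) = q * x := by rw [hI1, hI0, hk]; ring
      have hrem : n - q * x * d = n' := by rw [← hdecomp]; ring
      rw [pvG, if_neg hz, if_pos hs, pvG, if_neg hn, if_neg hnbig]
      simp only [hper, hrem, if_neg hz]
    · -- remainder still big: both sides take the per/rem branch, shifted by q*x
      rw [pvG, if_neg hz, if_neg hs, pvG, if_neg hn, if_neg hnbig]
      simp only [hI1]
      have ec : n - 500 * (q * k + PySem.Int.floordiv n' (500 * d)) * d
          = n' - 500 * PySem.Int.floordiv n' (500 * d) * d := by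
        rw [← hdecomp, hk]; ring
      rw [ec]
      have ev : r + q * x + 500 * PySem.Int.floordiv n' (500 * d)
          = r + 500 * (q * k + PySem.Int.floordiv n' (500 * d)) := by rw [hk]; ring
      rw [ev]

theorem pvG_step (n d r x : Int) (hd : d ≠ 0) (hn : n ≠ 0)
    (hx5 : 500 ≤ x) (hxle : x ≤ PySem.Int.floordiv n d) (hdvd : 500 ∣ x) :
    pvG (PySem.Int.mod n (x * d)) d (r + PySem.Int.floordiv n (x * d) * x) = pvG n d r := by
  obtain ⟨k, hk⟩ := hdvd
  apply pvG_step_core n d r x k _ _ hd hn hk (by omega)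
  · have := PySem.Int.floordiv_mul_add_mod n (x * d); linarith
  · omega
  · constructor
    · intro hdp
      have hm : (0:Int) < x * d := by nlinarith
      exact ⟨PySem.Int.mod_nonneg n hm, PySem.Int.mod_lt n hm⟩
    · intro hdn
      have hm : x * d < 0 := by nlinarith
      exact PySem.Int.mod_neg_bounds n hm

theorem pvLoopA_eq_G : ∀ (N : Nat) (n d r : Int), n.natAbs ≤ N → d ≠ 0 →
    pvLoopA n d r = pvG n d r := by
  intro N
  induction N with
  | zero =>
    intro n d r hN hd
    have hn : n = 0 := by omega
    rw [pvLoopA, pvG]; simp [hn]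
  | succ N ih =>
    intro n d r hN hd
    by_cases hn : n = 0
    · rw [pvLoopA, pvG]; simp [hn]
    · rw [pvLoopA, dif_neg hn]
      split
      · next hp =>
        have hx := pvPick_none _ hp
        rw [pvG, if_neg hn, if_pos hx]
      · next x hp =>
        obtain ⟨hx5, hxle, hdvd⟩ := pvPick_some _ x hp
        have hdec := pvStep_dec n d x hx5 hxle hn
        rw [ih (PySem.Int.mod n (x * d)) d (r + PySem.Int.floordiv n (x * d) * x) (by omega) hd]
        exact pvG_step n d r x hd hn hx5 hxle hdvd

theorem pv_alt_eq_G (n d : Int) : bagi_pembayaran_alt n d = pvG n d 0 := by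
  simp only [bagi_pembayaran_alt, pvG, zero_add]

-- ===== VERDICT =====
theorem bagi_pembayaran_spec : Claim_equal_bagi_pembayaran := by
  intro n d _ hpre
  unfold Spec_bagi_pembayaran
  rcases eq_or_ne n 0 with hn | hn
  · subst hn
    rw [bagi_pembayaran, pvLoopA, pv_alt_eq_G, pvG]; simp
  · have hd : d ≠ 0 := hpre.resolve_left hn
    rw [bagi_pembayaran, pvLoopA_eq_G n.natAbs n d 0 le_rfl hd, pv_alt_eq_G]
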